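-- pv_equiv track=rewrite | github.com/kolijpjpd/CourseraDownloaderByLIME | general.py | move_to_first
-- ===== SOURCE A (Python) =====
-- def move_to_first(dictionary, key):
--     if key not in dictionary:
--         return dictionary  # Key not found, no changes needed
--
--     value = dictionary[key]
--     # Create a new dictionary with the desired key-value pair as the first item
--     new_dict = {key: value}
--
--     for k, v in dictionary.items():
--         if k != key:
--             # Insert the remaining key-value pairs into the new dictionary
--             new_dict[k] = v
--
--     return new_dict
-- ===== SOURCE B (Python) =====
-- def move_to_first(dictionary, key):
--     if key not in dictionary:
--         return dictionary  # Key not found, no changes needed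
--     # Stable sort: False < True, so `key` comes first; the rest keep their order.
--     order = sorted(dictionary, key=lambda k: k != key)
--     return {k: dictionary[k] for k in order}
-- ===== Notes on version B (the rewrite author's own statement) =====
-- stated objective: alternative
-- what changed: Instead of writing the target pair first and re-inserting the rest while skipping the key, B computes the key order with a stable boolean-keyed sort (target first, rest in original order) and then materializes the dict by lookup.
import Mathlib
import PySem

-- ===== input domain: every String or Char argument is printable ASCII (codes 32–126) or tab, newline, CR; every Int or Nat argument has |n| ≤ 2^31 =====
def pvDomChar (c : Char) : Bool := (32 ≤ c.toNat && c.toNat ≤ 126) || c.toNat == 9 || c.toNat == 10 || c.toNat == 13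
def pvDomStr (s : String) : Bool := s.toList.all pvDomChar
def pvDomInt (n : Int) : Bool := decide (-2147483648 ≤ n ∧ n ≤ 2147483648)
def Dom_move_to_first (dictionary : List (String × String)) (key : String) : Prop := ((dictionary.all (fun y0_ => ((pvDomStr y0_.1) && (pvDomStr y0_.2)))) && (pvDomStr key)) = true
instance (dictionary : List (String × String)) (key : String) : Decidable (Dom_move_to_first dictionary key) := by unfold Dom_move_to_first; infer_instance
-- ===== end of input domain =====

-- B reorders by a stable boolean-keyed sort over the keys and then materializes by lookup,
-- instead of A's write-first-then-skip insertion pass; same return value, no speed claim.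

-- ===== PORT A =====
def move_to_first (dictionary : List (String × String)) (key : String) : List (String × String) :=
  let d := PySem.Dict.ofList dictionary   -- the dict the association list denotes
  if d.contains key = false then d.items  -- key not found, no changes needed
  else
    match d.get? key with                 -- value = dictionary[key]  (present: guarded by `contains`)
    | none => d.items                     -- unreachable under the guard
    | some value =>
      let new_dict : PySem.Dict String String := PySem.Dict.empty.insert key value
      let new_dict := d.items.foldl
        (fun nd kv => if decide (kv.1 ≠ key) then nd.insert kv.1 kv.2 else nd) new_dict
      new_dict.items

-- ===== PORT B =====
def move_to_first_alt (dictionary : List (String × String)) (key : String) : List (String × String) :=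
  let d := PySem.Dict.ofList dictionary
  if d.contains key = false then d.items  -- key not found, no changes needed
  else
    -- order = sorted(dictionary, key=lambda k: k != key)  (stable: False < True)
    let order := PySem.List.sorted d.keys (fun k => decide (k ≠ key)) false
    -- {k: dictionary[k] for k in order}; every k comes from d's keys, so the lookup
    -- dictionary[k] is present and getD's default is unreachable
    (order.foldl (fun nd k => nd.insert k (d.getD k "")) PySem.Dict.empty).items

-- ===== PRECONDITION & SPEC =====
def Spec_move_to_first (dictionary : List (String × String)) (key : String) (out : List (String × String)) : Prop := out = move_to_first_alt dictionary key
instance (dictionary : List (String × String)) (key : String) (out : List (String × String)) : Decidable (Spec_move_to_first dictionary key out) := by unfold Spec_move_to_first; infer_instance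

-- ===== CLAIM (what is proved, stated in full; the proofs are below) =====
def Claim_equal_move_to_first : Prop := ∀ (dictionary : List (String × String)) (key : String), Dom_move_to_first dictionary key → Spec_move_to_first dictionary key (move_to_first dictionary key)

-- ===== LEMMAS AND PROOFS =====

-- a loop that skips elements failing p is a loop over the filtered list
theorem foldl_if_filter {α β : Type} (p : α → Bool) (f : β → α → β) (l : List α) (init : β) :
    l.foldl (fun acc x => if p x then f acc x else acc) init = (l.filter p).foldl f init := by
  induction l generalizing init with
  | nil => rfl
  | cons x t ih =>
    by_cases hx : p x = true
    · simp [List.foldl, List.filter, hx, ih]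
    · simp at hx; simp [List.foldl, List.filter, hx, ih]

-- insertBy lands between a prefix it must not go before and a suffix it must go before
theorem insertBy_between {α : Type} (before : α → α → Bool) (x : α) (P Q : List α)
    (hP : ∀ p ∈ P, before x p = false) (hQ : ∀ q ∈ Q, before x q = true) :
    PySem.List.insertBy before x (P ++ Q) = P ++ x :: Q := by
  induction P with
  | nil =>
    cases Q with
    | nil => rfl
    | cons q t => simp [PySem.List.insertBy, hQ q (by simp)]
  | cons p t ih =>
    have hp : before x p = false := hP p (by simp)
    simp [PySem.List.insertBy, hp]
    exact ih (fun y hy => hP y (by simp [hy]))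

-- the stable insertion-sort loop with a boolean key partitions: key-equal elements
-- accumulate after P, the rest append after Q
theorem foldl_insertBy_partition (key : String) (l P Q : List String)
    (hP : ∀ p ∈ P, p = key) (hQ : ∀ q ∈ Q, q ≠ key) :
    l.foldl (fun acc x =>
        PySem.List.insertBy (fun a b => decide ((decide (a ≠ key) : Bool) < decide (b ≠ key))) x acc)
      (P ++ Q)
    = P ++ l.filter (fun k => decide (k = key)) ++ Q ++ l.filter (fun k => decide (k ≠ key)) := by
  induction l generalizing P Q with
  | nil => simp
  | cons x t ih =>
    by_cases hx : x = key
    · have hins : PySem.List.insertBy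
          (fun a b => decide ((decide (a ≠ key) : Bool) < decide (b ≠ key))) x (P ++ Q)
          = P ++ x :: Q := by
        apply insertBy_between
        · intro p hp; simp [hx, hP p hp]
        · intro q hq; simp [hx, hQ q hq]
      have := ih (P ++ [x]) Q (by intro p hp; rcases List.mem_append.1 hp with h | h
                                  · exact hP p h
                                  · simp at h; simpa [h] using hx) hQ
      simp only [List.foldl, hins]
      rw [show P ++ x :: Q = (P ++ [x]) ++ Q by simp, this]
      simp [hx]
    · have hins : PySem.List.insertBy
          (fun a b => decide ((decide (a ≠ key) : Bool) < decide (b ≠ key))) x (P ++ Q)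
          = (P ++ Q) ++ [x] := by
        apply PySem.List.insertBy_of_forall_not_before
        intro y hy; simp [hx]
      have := ih P (Q ++ [x]) hP (by intro q hq; rcases List.mem_append.1 hq with h | h
                                     · exact hQ q h
                                     · simp at h; simpa [h] using hx)
      simp only [List.foldl, hins]
      rw [show (P ++ Q) ++ [x] = P ++ (Q ++ [x]) by simp, this]
      simp [hx]

-- the stable sort with key (k ≠ key) is: the key-equal elements, then the rest in order
theorem sorted_bool_key (key : String) (l : List String) :
    PySem.List.sorted l (fun k => decide (k ≠ key)) false
    = l.filter (fun k => decide (k = key)) ++ l.filter (fun k => decide (k ≠ key)) := by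
  rw [PySem.List.sorted_eq_foldl_insertBy]
  simpa using foldl_insertBy_partition key l [] [] (by simp) (by simp)

-- in a duplicate-free list containing key, the key-equal elements are exactly [key]
theorem filter_eq_key (key : String) (l : List String) (hnd : l.Nodup) (hmem : key ∈ l) :
    l.filter (fun k => decide (k = key)) = [key] := by
  induction l with
  | nil => simp at hmem
  | cons x t ih =>
    rcases List.mem_cons.1 hmem with h | h
    · have hnil : t.filter (fun k => decide (k = key)) = [] := by
        rw [List.filter_eq_nil_iff]
        intro a ha hax
        simp at hax
        rw [hax, h] at ha
        exact (List.nodup_cons.1 hnd).1 ha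
      simp [List.filter, ← h, hnil]
    · have hx : x ≠ key := by
        rintro rfl; exact (List.nodup_cons.1 hnd).1 h
      simp [List.filter, hx, ih (List.nodup_cons.1 hnd).2 h]

-- ===== VERDICT (by name: the statement is the Claim_ definition above) =====
theorem move_to_first_spec : Claim_equal_move_to_first := by
  intro dictionary key _
  unfold Spec_move_to_first move_to_first move_to_first_alt
  set d := PySem.Dict.ofList dictionary with hd
  by_cases hc : d.contains key = false
  · simp [hc]
  · have hct : d.contains key = true := by
      cases h : d.contains key
      · exact absurd h hc
      · rfl
    have hnd : d.keys.Nodup := PySem.Dict.nodup_keys_ofList dictionary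
    have hmem : key ∈ d.keys := (PySem.Dict.contains_iff_mem_keys d key).1 hct
    obtain ⟨v, hv⟩ : ∃ v, d.get? key = some v := by
      have hiso := PySem.Dict.contains_eq_isSome_get? d key
      rw [hct] at hiso
      cases hgv : d.get? key with
      | none => rw [hgv] at hiso; simp at hiso
      | some v => exact ⟨v, rfl⟩
    simp only [hct, Bool.true_eq_false, if_false, hv]
    -- A side
    rw [foldl_if_filter]
    have hAfresh : ∀ a ∈ d.items.filter (fun kv => decide (kv.1 ≠ key)),
        (PySem.Dict.empty.insert key v).contains a.1 = false := by
      intro a ha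
      have hne : a.1 ≠ key := by
        have := List.of_mem_filter ha; simpa using this
      rw [PySem.Dict.contains_insert]
      simp [hne]
    have hAnodup : ((d.items.filter (fun kv => decide (kv.1 ≠ key))).map Prod.fst).Nodup := by
      have hsub : (d.items.filter (fun kv => decide (kv.1 ≠ key))).Sublist d.items :=
        List.filter_sublist
      exact List.Nodup.sublist (hsub.map Prod.fst) hnd
    have hA := PySem.Dict.items_foldl_insert_fresh
      (d.items.filter (fun kv => decide (kv.1 ≠ key))) Prod.fst Prod.snd
      (PySem.Dict.empty.insert key v) hAfresh hAnodup
    rw [hA, PySem.Dict.items_insert_of_not_contains PySem.Dict.empty v (PySem.Dict.contains_empty key)]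
    -- B side
    rw [sorted_bool_key, filter_eq_key key d.keys hnd hmem]
    have hBnodup : ((key :: d.keys.filter (fun k => decide (k ≠ key))).map (fun k => k)).Nodup := by
      simp only [List.map_id']
      refine List.nodup_cons.2 ⟨?_, List.Nodup.filter (fun k => decide (k ≠ key)) hnd⟩
      intro h
      have := List.of_mem_filter h; simp at this
    have hBfresh : ∀ a ∈ key :: d.keys.filter (fun k => decide (k ≠ key)),
        (PySem.Dict.empty (κ := String) (ν := String)).contains ((fun k => k) a) = false := by
      intro a _; exact PySem.Dict.contains_empty a
    have hB : (List.foldl (fun nd k => nd.insert k (d.getD k ""))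
          PySem.Dict.empty (key :: d.keys.filter (fun k => decide (k ≠ key)))).items
        = PySem.Dict.empty.items
          ++ (key :: d.keys.filter (fun k => decide (k ≠ key))).map (fun k => (k, d.getD k "")) :=
      PySem.Dict.items_foldl_insert_fresh
        (key :: d.keys.filter (fun k => decide (k ≠ key))) (fun k => k) (fun k => d.getD k "")
        PySem.Dict.empty hBfresh hBnodup
    have hgd : d.getD key "" = v := PySem.Dict.getD_of_get?_eq_some d "" hv
    have hitems : d.items = d.keys.map (fun k => (k, d.getD k "")) :=
      PySem.Dict.items_eq_map_keys d hnd ""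
    simp only [List.singleton_append]
    rw [hB]
    show [] ++ [(key, v)] ++ _ = [] ++ _
    simp only [List.nil_append, List.map_cons, hgd, List.cons_append]
    congr 1
    rw [hitems, List.filter_map]
    simp only [Function.comp_def, List.map_map]
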